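-- pv_equiv track=rewrite | github.com/osekilab/CAG | src/preprocess.py | is_next_open_bracket
-- ===== SOURCE A (Python) =====
-- def is_next_open_bracket(line, start_idx):
--     start_idx += 1
--     for char in line[start_idx:]:
--         if char == '(':
--             return True
--         elif char == ')':
--             return False
--     raise IndexError(
--         'Bracket possibly not balanced, open bracket not followed by closed bracket'
--     )
-- ===== SOURCE B (Python) =====
-- def is_next_open_bracket(line, start_idx):
--     o = line.find('(', start_idx + 1)
--     c = line.find(')', start_idx + 1)
--     if o == -1 and c == -1:
--         raise IndexError(
--             'Bracket possibly not balanced, open bracket not followed by closed bracket'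
--         )
--     if c == -1:
--         return True
--     if o == -1:
--         return False
--     return o < c
-- ===== Notes on version B (the rewrite author's own statement) =====
-- stated objective: idiomatic
-- what changed: B replaces A's char-by-char scan over line[start_idx+1:] with two str.find calls locating the first '(' and ')' and comparing their positions.
import Mathlib
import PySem

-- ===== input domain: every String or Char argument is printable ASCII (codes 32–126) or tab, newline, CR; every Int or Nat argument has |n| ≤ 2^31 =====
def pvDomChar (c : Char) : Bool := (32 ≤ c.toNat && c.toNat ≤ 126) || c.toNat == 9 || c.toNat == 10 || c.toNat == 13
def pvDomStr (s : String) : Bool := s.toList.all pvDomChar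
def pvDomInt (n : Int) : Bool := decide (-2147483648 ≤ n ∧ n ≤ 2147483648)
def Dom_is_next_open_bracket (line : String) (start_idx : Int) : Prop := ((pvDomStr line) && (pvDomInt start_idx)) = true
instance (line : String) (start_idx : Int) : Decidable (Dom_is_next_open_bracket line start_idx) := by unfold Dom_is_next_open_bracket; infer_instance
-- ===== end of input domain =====

-- B locates the first '(' and ')' with str.find and compares positions instead of scanning char-by-char (idiomatic; same cost).

-- ===== PORT A =====
-- the 'for char in line[start_idx:]' loop with its two early returns; none = fell off the loop (Python raises IndexError there)
def pvScanA : List Char → Option Bool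
  | [] => none
  | ch :: rest =>
    if ch = '(' then some true
    else if ch = ')' then some false
    else pvScanA rest

def is_next_open_bracket (line : String) (start_idx : Int) : Bool :=
  -- raise IndexError → excluded by Pre_; .getD false is never reached under Pre_
  (pvScanA (PySem.List.slice line.toList (some (start_idx + 1)) none)).getD false

-- ===== PORT B =====
-- B's early-return chain over the two found positions (o = -1 ∧ c = -1: Python B raises IndexError, excluded by Pre_)
def pvJudge (o c : Int) : Bool :=
  if o = -1 ∧ c = -1 then false
  else if c = -1 then true
  else if o = -1 then false
  else decide (o < c)

def is_next_open_bracket_alt (line : String) (start_idx : Int) : Bool :=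
  pvJudge (PySem.Str.findFrom line "(" (start_idx + 1)) (PySem.Str.findFrom line ")" (start_idx + 1))

-- ===== PRECONDITION & SPEC =====
-- Pre_ excludes exactly the inputs on which A raises IndexError: no '(' and no ')' in line[start_idx+1:]
def Pre_is_next_open_bracket (line : String) (start_idx : Int) : Prop :=
  '(' ∈ PySem.List.slice line.toList (some (start_idx + 1)) none ∨
  ')' ∈ PySem.List.slice line.toList (some (start_idx + 1)) none
instance (line : String) (start_idx : Int) : Decidable (Pre_is_next_open_bracket line start_idx) := by
  unfold Pre_is_next_open_bracket; infer_instance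
def pvWitness_is_next_open_bracket : String × Int := ("a()", 0)

def Spec_is_next_open_bracket (line : String) (start_idx : Int) (out : Bool) : Prop := out = is_next_open_bracket_alt line start_idx
instance (line : String) (start_idx : Int) (out : Bool) : Decidable (Spec_is_next_open_bracket line start_idx out) := by unfold Spec_is_next_open_bracket; infer_instance

-- ===== CLAIM (what is proved, stated in full; the proofs are below) =====
def Claim_equal_is_next_open_bracket : Prop := ∀ (line : String) (start_idx : Int), Dom_is_next_open_bracket line start_idx → Pre_is_next_open_bracket line start_idx → Spec_is_next_open_bracket line start_idx (is_next_open_bracket line start_idx)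

-- ===== LEMMAS AND PROOFS =====

-- find.go never returns a value below its running index (other than -1)
theorem pv_go_ge (sub : List Char) (l : List Char) (k : Nat) :
    PySem.Chars.find.go sub l k = -1 ∨ (k : Int) ≤ PySem.Chars.find.go sub l k := by
  induction l generalizing k with
  | nil =>
    simp only [PySem.Chars.find.go]
    split_ifs <;> simp
  | cons ch t ih =>
    simp only [PySem.Chars.find.go]
    split_ifs with h
    · right; exact le_refl _
    · rcases ih (k + 1) with h1 | h1
      · left; exact h1
      · right; refine le_trans ?_ h1; push_cast; omega

-- core: A's scan agrees with B's compare-the-two-first-occurrences, at any running index k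
theorem pv_core (l : List Char) (k : Nat) :
    (pvScanA l).getD false =
      pvJudge (PySem.Chars.find.go ['('] l k) (PySem.Chars.find.go [')'] l k) := by
  induction l generalizing k with
  | nil => simp [pvScanA, pvJudge, PySem.Chars.find.go]
  | cons ch t ih =>
    by_cases ho : ch = '('
    · subst ho
      simp only [pvScanA, PySem.Chars.find.go, List.isPrefixOf]
      rcases pv_go_ge [')'] t (k + 1) with h | h <;>
        simp_all [pvJudge] <;> omega
    · by_cases hcc : ch = ')'
      · subst hcc
        simp only [pvScanA, PySem.Chars.find.go, List.isPrefixOf]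
        rcases pv_go_ge ['('] t (k + 1) with h | h <;>
          simp_all [pvJudge] <;> omega
      · have h1 : ¬ (['('].isPrefixOf (ch :: t) = true) := by
          simp [List.isPrefixOf]; exact fun h => ho h.symm
        have h2 : ¬ ([')'].isPrefixOf (ch :: t) = true) := by
          simp [List.isPrefixOf]; exact fun h => hcc h.symm
        simp only [pvScanA, PySem.Chars.find.go, h1, h2, if_neg ho, if_neg hcc]
        exact ih (k + 1)

-- findFrom with no end bound = clamp the start, then find in the suffix (offset by the clamp)
theorem pv_findFrom_clamp (cs sub : List Char) (hsub : sub ≠ []) (a : Int) :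
    PySem.Chars.findFrom cs sub a none =
      (if PySem.Chars.find (cs.drop (PySem.List.clampIdx cs.length a)) sub = -1 then -1
       else (PySem.List.clampIdx cs.length a : Int) +
            PySem.Chars.find (cs.drop (PySem.List.clampIdx cs.length a)) sub) := by
  have hfindnil : PySem.Chars.find ([] : List Char) sub = -1 := by
    simp only [PySem.Chars.find, PySem.Chars.find.go]
    simp [List.isEmpty_iff, hsub]
  simp only [PySem.Chars.findFrom, PySem.List.clampIdx, Int.toNat_natCast, List.take_length]
  rw [Int.add_comm a (cs.length : Int)]
  by_cases ha : a < 0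
  · by_cases hz : (cs.length : Int) + a < 0
    · simp only [if_pos ha, if_pos hz]
      rw [if_neg (by omega : ¬ ((cs.length : Int) < 0))]
      simp
    · simp only [if_pos ha, if_neg hz]
      rw [if_neg (by omega : ¬ ((cs.length : Int) < (cs.length : Int) + a))]
      rw [Int.toNat_of_nonneg (by omega : (0:Int) ≤ (cs.length : Int) + a)]
  · by_cases hgt : (cs.length : Int) < a
    · simp only [if_neg ha]
      rw [if_pos hgt]
      have hmin : min a.toNat cs.length = cs.length := by omega
      rw [hmin, List.drop_length, hfindnil, if_pos rfl]
    · simp only [if_neg ha]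
      rw [if_neg hgt]
      have hmin : min a.toNat cs.length = a.toNat := by omega
      rw [hmin, Int.toNat_of_nonneg (by omega : (0:Int) ≤ a)]

-- adding the same offset k to both found positions does not change B's verdict
theorem pv_judge_shift (k : Nat) (fo fc : Int)
    (hfo : fo = -1 ∨ 0 ≤ fo) (hfc : fc = -1 ∨ 0 ≤ fc) :
    pvJudge (if fo = -1 then (-1 : Int) else (k : Int) + fo)
            (if fc = -1 then (-1 : Int) else (k : Int) + fc) = pvJudge fo fc := by
  unfold pvJudge
  rcases hfo with h | h <;> rcases hfc with h' | h' <;>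
    split_ifs <;> simp_all <;> omega

-- ===== VERDICT (by name: the statement is the Claim_ definition above) =====
theorem is_next_open_bracket_spec : Claim_equal_is_next_open_bracket := by
  intro line start_idx _ _
  unfold Spec_is_next_open_bracket is_next_open_bracket is_next_open_bracket_alt
  rw [PySem.Str.findFrom_eq, PySem.Str.findFrom_eq]
  rw [show "(".toList = ['('] from rfl, show ")".toList = [')'] from rfl]
  rw [pv_findFrom_clamp line.toList ['('] (by decide) (start_idx + 1)]
  rw [pv_findFrom_clamp line.toList [')'] (by decide) (start_idx + 1)]
  rw [PySem.List.slice_some_none]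
  set k := PySem.List.clampIdx line.toList.length (start_idx + 1) with hk
  set l := List.drop k line.toList with hl
  rw [pv_core l 0]
  simp only [PySem.Chars.find]
  exact (pv_judge_shift k _ _ (pv_go_ge ['('] l 0) (pv_go_ge [')'] l 0)).symm
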